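-- pv_equiv track=rewrite | github.com/euyis1019/GA_Multi-obj-optimization | GA_insole/GP/Model_GA.py | remove_duplicates_and_blank
-- ===== SOURCE A (Python) =====
-- def remove_duplicates_and_blank(token_idx_list):
--     """去除重复字符和空白字符"""
--     res = []
--     cur = 0
--     BLANK_ID = 0
--     while cur < len(token_idx_list):
--         if token_idx_list[cur] != BLANK_ID:
--             res.append(token_idx_list[cur])
--         prev = cur
--         while cur < len(token_idx_list) and token_idx_list[cur] == token_idx_list[prev]:
--             cur += 1
--     return res
-- ===== SOURCE B (Python) =====
-- def remove_duplicates_and_blank(token_idx_list):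
--     """去除重复字符和空白字符"""
--     res = []
--     prev = None
--     for t in token_idx_list:
--         if t != prev and t != 0:
--             res.append(t)
--         prev = t
--     return res
-- ===== Notes on version B (the rewrite author's own statement) =====
-- stated objective: simpler
-- what changed: Replaced the index-based outer loop with an inner run-skipping while loop by a single flat pass that keeps the previous token (None sentinel) and appends a token exactly when it differs from its predecessor and is not blank.
import Mathlib
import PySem

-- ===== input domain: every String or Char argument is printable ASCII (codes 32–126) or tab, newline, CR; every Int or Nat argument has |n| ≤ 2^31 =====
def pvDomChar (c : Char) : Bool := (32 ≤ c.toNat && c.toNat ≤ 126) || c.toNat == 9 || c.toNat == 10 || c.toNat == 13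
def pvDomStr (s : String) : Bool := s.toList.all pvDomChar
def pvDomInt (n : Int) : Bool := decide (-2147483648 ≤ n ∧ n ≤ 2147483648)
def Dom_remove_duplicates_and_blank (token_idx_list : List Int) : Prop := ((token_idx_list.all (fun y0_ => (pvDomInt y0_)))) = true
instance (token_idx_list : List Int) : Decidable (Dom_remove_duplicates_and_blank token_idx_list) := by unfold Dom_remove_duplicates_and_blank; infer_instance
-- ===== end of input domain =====

-- B replaces A's outer index loop with inner run-skipping while loop by one flat
-- previous-token pass (objective: simpler); return values agree on all inputs.

-- ===== PORT A =====
-- inner `while cur < len and token_idx_list[cur] == token_idx_list[prev]: cur += 1`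
-- (the run value token_idx_list[prev] is fixed at entry, passed as v)
def skipRunA (xs : List Int) (v : Int) (cur : Nat) : Nat :=
  if _h : cur < xs.length ∧ xs.getD cur 0 = v then skipRunA xs v (cur + 1) else cur
termination_by xs.length - cur

theorem skipRunA_le (xs : List Int) (v : Int) (cur : Nat) : cur ≤ skipRunA xs v cur := by
  induction cur using skipRunA.induct xs v with
  | case1 cur h ih => rw [skipRunA, dif_pos h]; omega
  | case2 cur h => rw [skipRunA, dif_neg h]

theorem skipRunA_gt (xs : List Int) (cur : Nat)
    (h : cur < xs.length) : cur < skipRunA xs (xs.getD cur 0) cur := by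
  rw [skipRunA, dif_pos ⟨h, rfl⟩]
  exact Nat.lt_of_lt_of_le (Nat.lt_succ_self _) (skipRunA_le _ _ _)

-- outer `while cur < len(token_idx_list): …` with accumulator res
def loopA (xs : List Int) (cur : Nat) (res : List Int) : List Int :=
  if h : cur < xs.length then
    let t := xs.getD cur 0
    loopA xs (skipRunA xs t cur) (if t ≠ 0 then res ++ [t] else res)
  else res
termination_by xs.length - cur
decreasing_by have := skipRunA_gt xs cur h; omega

def remove_duplicates_and_blank (token_idx_list : List Int) : List Int :=
  loopA token_idx_list 0 []

-- ===== PORT B =====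
-- `for t in token_idx_list:` with state (res, prev); prev = None sentinel initially
def loopB (prev : Option Int) (xs : List Int) (res : List Int) : List Int :=
  match xs with
  | [] => res
  | t :: ts => loopB (some t) ts (if some t ≠ prev ∧ t ≠ 0 then res ++ [t] else res)

def remove_duplicates_and_blank_alt (token_idx_list : List Int) : List Int :=
  loopB none token_idx_list []

-- ===== PRECONDITION & SPEC =====
def Spec_remove_duplicates_and_blank (token_idx_list : List Int) (out : List Int) : Prop := out = remove_duplicates_and_blank_alt token_idx_list
instance (token_idx_list : List Int) (out : List Int) : Decidable (Spec_remove_duplicates_and_blank token_idx_list out) := by unfold Spec_remove_duplicates_and_blank; infer_instance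

-- ===== CLAIM (what is proved, stated in full; the proofs are below) =====
def Claim_equal_remove_duplicates_and_blank : Prop := ∀ (token_idx_list : List Int), Dom_remove_duplicates_and_blank token_idx_list → Spec_remove_duplicates_and_blank token_idx_list (remove_duplicates_and_blank token_idx_list)

-- ===== LEMMAS AND PROOFS =====

-- skipRunA lands on the dropWhile suffix of the current run
theorem drop_skipRunA (xs : List Int) (v : Int) (cur : Nat) :
    xs.drop (skipRunA xs v cur) = (xs.drop cur).dropWhile (fun x => x == v) := by
  induction cur using skipRunA.induct xs v with
  | case1 cur h ih =>
    rw [skipRunA, dif_pos h, ih]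
    obtain ⟨hlt, hv⟩ := h
    rw [List.drop_eq_getElem_cons hlt, List.dropWhile_cons_of_pos]
    simp [List.getD_eq_getElem?_getD, List.getElem?_eq_getElem hlt] at hv
    simp [hv]
  | case2 cur h =>
    rw [skipRunA, dif_neg h]
    rcases Nat.lt_or_ge cur xs.length with hlt | hge
    · have hv : ¬ xs.getD cur 0 = v := fun hv => h ⟨hlt, hv⟩
      rw [List.drop_eq_getElem_cons hlt, List.dropWhile_cons_of_neg]
      simp [List.getD_eq_getElem?_getD, List.getElem?_eq_getElem hlt] at hv
      simp [hv]
    · simp [List.drop_eq_nil_of_le hge]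

-- loopB ignores a prefix equal to its prev value
theorem loopB_dropWhile (v : Int) (xs res : List Int) :
    loopB (some v) xs res = loopB (some v) (xs.dropWhile (fun x => x == v)) res := by
  induction xs generalizing res with
  | nil => rfl
  | cons t ts ih =>
    by_cases hv : t = v
    · subst hv
      rw [List.dropWhile_cons_of_pos (by simp)]
      rw [loopB, if_neg (by simp)]
      exact ih res
    · rw [List.dropWhile_cons_of_neg (by simp [hv])]

-- skipRunA's stopping point no longer continues the run
theorem skipRunA_stop (xs : List Int) (v : Int) (cur : Nat) :
    ¬ (skipRunA xs v cur < xs.length ∧ xs.getD (skipRunA xs v cur) 0 = v) := by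
  induction cur using skipRunA.induct xs v with
  | case1 cur h ih => rw [skipRunA, dif_pos h]; exact ih
  | case2 cur h => rw [skipRunA, dif_neg h]; exact h

-- main invariant: at an outer-loop head of A, prev differs from the current head
theorem loopA_eq_loopB (xs : List Int) (cur : Nat) (res : List Int) (prev : Option Int)
    (hprev : ∀ v, prev = some v → (xs.drop cur).head? ≠ some v) :
    loopA xs cur res = loopB prev (xs.drop cur) res := by
  induction cur, res using loopA.induct xs generalizing prev with
  | case1 cur res h t ih =>
    rw [loopA, dif_pos h]
    have ht : xs.getD cur 0 = xs[cur] := by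
      simp [List.getD_eq_getElem?_getD, List.getElem?_eq_getElem h]
    have hdrop : xs.drop cur = xs[cur] :: xs.drop (cur + 1) := List.drop_eq_getElem_cons h
    have hne : some xs[cur] ≠ prev := by
      intro hp
      exact hprev xs[cur] hp.symm (by rw [hdrop]; rfl)
    have hres : (if some xs[cur] ≠ prev ∧ xs[cur] ≠ 0 then res ++ [xs[cur]] else res)
        = (if xs.getD cur 0 ≠ 0 then res ++ [xs.getD cur 0] else res) := by
      rw [ht]; by_cases h0 : xs[cur] = (0 : Int) <;> simp [h0, hne]
    have hstop' : ¬ (skipRunA xs xs[cur] cur < xs.length ∧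
        xs.getD (skipRunA xs xs[cur] cur) 0 = xs[cur]) := by
      rw [← ht]; exact skipRunA_stop xs (xs.getD cur 0) cur
    have hinv : ∀ v, (some xs[cur] : Option Int) = some v →
        (xs.drop (skipRunA xs xs[cur] cur)).head? ≠ some v := by
      intro v hv hh
      simp only [Option.some.injEq] at hv
      rcases Nat.lt_or_ge (skipRunA xs xs[cur] cur) xs.length with hlt | hge
      · rw [List.drop_eq_getElem_cons hlt] at hh
        simp only [List.head?_cons, Option.some.injEq] at hh
        refine hstop' ⟨hlt, ?_⟩
        simp only [List.getD_eq_getElem?_getD, List.getElem?_eq_getElem hlt, Option.getD_some]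
        rw [hh, ← hv]
      · rw [List.drop_eq_nil_of_le hge] at hh; simp at hh
    have hinv' : ∀ v, (some xs[cur] : Option Int) = some v →
        (xs.drop (skipRunA xs (xs.getD cur 0) cur)).head? ≠ some v := by
      rw [ht]; exact hinv
    rw [hdrop, loopB, hres]
    calc loopA xs (skipRunA xs (xs.getD cur 0) cur)
            (if xs.getD cur 0 ≠ 0 then res ++ [xs.getD cur 0] else res)
        = loopB (some xs[cur]) (xs.drop (skipRunA xs (xs.getD cur 0) cur))
            (if xs.getD cur 0 ≠ 0 then res ++ [xs.getD cur 0] else res) := ih _ hinv'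
      _ = loopB (some xs[cur]) ((xs.drop cur).dropWhile (fun x => x == xs.getD cur 0))
            (if xs.getD cur 0 ≠ 0 then res ++ [xs.getD cur 0] else res) := by
            rw [drop_skipRunA]
      _ = loopB (some xs[cur]) ((xs.drop (cur + 1)).dropWhile (fun x => x == xs[cur]))
            (if xs.getD cur 0 ≠ 0 then res ++ [xs.getD cur 0] else res) := by
            rw [ht, hdrop, List.dropWhile_cons_of_pos (by simp)]
      _ = loopB (some xs[cur]) (xs.drop (cur + 1))
            (if xs.getD cur 0 ≠ 0 then res ++ [xs.getD cur 0] else res) :=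
            (loopB_dropWhile _ _ _).symm
  | case2 cur res h =>
    rw [loopA, dif_neg h]
    rw [List.drop_eq_nil_of_le (by omega)]
    rfl

-- ===== VERDICT (by name: the statement is the Claim_ definition above) =====
theorem remove_duplicates_and_blank_spec : Claim_equal_remove_duplicates_and_blank := by
  intro xs _
  unfold Spec_remove_duplicates_and_blank remove_duplicates_and_blank remove_duplicates_and_blank_alt
  have := loopA_eq_loopB xs 0 [] none (by simp)
  simpa using this
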